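-- pv_equiv track=rewrite | github.com/rendezvous3/ai-wine-sommelier | vectorizer/src/normalize_products.py | clean_effects
-- ===== SOURCE A (Python) =====
-- EFFECT_GROUPS = {
--     "sedating": {"sleepy", "sedated", "relaxed", "calm", "chill"},
--     "energizing": {"energetic", "uplifting", "energized"},
--     "creative": {"creative", "inspired"},
--     "joyful": {"happy", "euphoric"},
--     "clear_mind": {"clear-mind", "focused"}
-- }
--
-- def clean_effects(effects: list, product_type: str) -> list:
--     """
--     Clean effects array to remove contradictory effects.
--
--     Moved from vectorize.py for centralization.
--
--     Strategies:
--     1. Sedating effects are isolated - if present, remove all energizing/creative/joyful effects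
--     2. Type-based filtering for extremes (energizing only in sativa/hybrid, sedating extremes only in indica/hybrid)
--     3. Creative and joyful effects can blend with energizing, but NOT with sedating
--
--     Args:
--         effects: List of effect strings
--         product_type: Product strain type (indica, sativa, hybrid, etc.)
--
--     Returns:
--         Cleaned list of effects
--     """
--     if not effects or not isinstance(effects, list):
--         return []
--
--     # Normalize to lowercase
--     normalized = [str(e).lower().strip() for e in effects if e]
--     if not normalized:
--         return []
--
--     # Normalize variations
--     # "clear mind" -> "clear-mind"
--     normalized = ["clear-mind" if e == "clear mind" else e for e in normalized]
--     # "euphoria", "euphoric" -> "euphoric"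
--     normalized = ["euphoric" if e in ["euphoria"] else e for e in normalized]
--
--     # Get effect groups
--     sedating_effects = EFFECT_GROUPS["sedating"]
--     energizing_effects = EFFECT_GROUPS["energizing"]
--     creative_effects = EFFECT_GROUPS["creative"]
--     joyful_effects = EFFECT_GROUPS["joyful"]
--
--     # Strategy 2: Type-based filtering for extremes
--     product_type_lower = product_type.lower() if product_type else ""
--
--     # If indica, remove energizing effects
--     if product_type_lower in ["indica", "indica-hybrid", "indica-dominant"]:
--         normalized = [e for e in normalized if e not in energizing_effects]
--
--     # If sativa, remove extreme sedating effects (sleepy, sedated) but keep relaxed/calm/chill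
--     if product_type_lower in ["sativa", "sativa-hybrid", "sativa-dominant"]:
--         normalized = [e for e in normalized if e not in {"sleepy", "sedated"}]
--
--     # Strategy 1: Sedating effects are isolated - if ANY sedating effect is present,
--     # remove ALL energizing, creative, and joyful effects
--     has_sedating = any(e in sedating_effects for e in normalized)
--     if has_sedating:
--         normalized = [e for e in normalized if e not in energizing_effects]
--         normalized = [e for e in normalized if e not in creative_effects]
--         normalized = [e for e in normalized if e not in joyful_effects]
--
--     # Strategy 3: Creative and joyful effects can blend with energizing,
--     # but if sedating is present (from above check), they're already removed
--
--     # Remove "clear mind" if "sleepy" is present (contradictory)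
--     if "sleepy" in normalized and "clear-mind" in normalized:
--         normalized = [e for e in normalized if e != "clear-mind"]
--
--     return normalized
-- ===== SOURCE B (Python) =====
-- EFFECT_GROUPS = {
--     "sedating": {"sleepy", "sedated", "relaxed", "calm", "chill"},
--     "energizing": {"energetic", "uplifting", "energized"},
--     "creative": {"creative", "inspired"},
--     "joyful": {"happy", "euphoric"},
--     "clear_mind": {"clear-mind", "focused"}
-- }
--
--
-- def _normalize_one(e):
--     s = str(e).lower().strip()
--     if s == "clear mind":
--         return "clear-mind"
--     if s == "euphoria":
--         return "euphoric"
--     return s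
--
--
-- def clean_effects(effects: list, product_type: str) -> list:
--     """Single forbidden-set formulation: one normalization pass, one final filter pass,
--     instead of A's repeated re-filterings of the list."""
--     normalized = []
--     for e in effects:
--         if e:
--             normalized.append(_normalize_one(e))
--
--     pt = product_type.lower() if product_type else ""
--     forbidden = set()
--     if pt in ("indica", "indica-hybrid", "indica-dominant"):
--         forbidden |= EFFECT_GROUPS["energizing"]
--     if pt in ("sativa", "sativa-hybrid", "sativa-dominant"):
--         forbidden |= {"sleepy", "sedated"}
--
--     survivors = [e for e in normalized if e not in forbidden]
--     if any(e in EFFECT_GROUPS["sedating"] for e in survivors):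
--         forbidden |= EFFECT_GROUPS["energizing"] | EFFECT_GROUPS["creative"] | EFFECT_GROUPS["joyful"]
--     if "sleepy" in survivors and "clear-mind" in survivors:
--         forbidden.add("clear-mind")
--
--     return [e for e in normalized if e not in forbidden]
-- ===== Notes on version B (the rewrite author's own statement) =====
-- stated objective: simpler
-- what changed: Instead of A's up-to-six sequential re-filterings of the normalized list, B normalizes each effect once with a helper, accumulates a single forbidden set (type-based removals, then the sedating-isolation groups and the sleepy/clear-mind rule tested on the post-type-filter survivors), and returns one final comprehension filtering against that set.
import Mathlib
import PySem

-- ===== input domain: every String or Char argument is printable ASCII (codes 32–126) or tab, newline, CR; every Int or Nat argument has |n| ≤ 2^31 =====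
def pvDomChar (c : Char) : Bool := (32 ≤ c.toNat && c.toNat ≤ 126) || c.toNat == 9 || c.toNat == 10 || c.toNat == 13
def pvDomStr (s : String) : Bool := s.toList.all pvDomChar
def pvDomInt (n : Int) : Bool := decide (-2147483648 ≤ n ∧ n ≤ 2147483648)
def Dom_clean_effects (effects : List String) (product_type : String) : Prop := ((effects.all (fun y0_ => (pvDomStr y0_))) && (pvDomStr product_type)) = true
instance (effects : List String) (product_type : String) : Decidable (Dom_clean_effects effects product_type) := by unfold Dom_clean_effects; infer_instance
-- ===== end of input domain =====

-- B replaces A's repeated re-filterings of the effects list by one accumulated forbidden set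
-- and a single final filter pass (objective: simpler); the return values are proved equal on all inputs.

-- EFFECT_GROUPS (module-level sets of distinct strings, shared by both sources)
def pvSedating : PySem.Set String := ["sleepy", "sedated", "relaxed", "calm", "chill"]
def pvEnergizing : PySem.Set String := ["energetic", "uplifting", "energized"]
def pvCreative : PySem.Set String := ["creative", "inspired"]
def pvJoyful : PySem.Set String := ["happy", "euphoric"]

-- ===== PORT A =====
def clean_effects (effects : List String) (product_type : String) : List String :=
  if effects.isEmpty then [] else
  let normalized := (effects.filter (fun e => !(e == ""))).map
    (fun e => PySem.Str.strip (PySem.Str.lower e))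
  if normalized.isEmpty then [] else
  let normalized := normalized.map (fun e => if e == "clear mind" then "clear-mind" else e)
  let normalized := normalized.map (fun e => if e == "euphoria" then "euphoric" else e)
  let product_type_lower := if !(product_type == "") then PySem.Str.lower product_type else ""
  let normalized := if ["indica", "indica-hybrid", "indica-dominant"].contains product_type_lower
    then normalized.filter (fun e => !(List.contains pvEnergizing e)) else normalized
  let normalized := if ["sativa", "sativa-hybrid", "sativa-dominant"].contains product_type_lower
    then normalized.filter (fun e => !((["sleepy", "sedated"] : List String).contains e)) else normalized
  let has_sedating := normalized.any (fun e => List.contains pvSedating e)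
  let normalized := if has_sedating then
      ((normalized.filter (fun e => !(List.contains pvEnergizing e))).filter
        (fun e => !(List.contains pvCreative e))).filter (fun e => !(List.contains pvJoyful e))
    else normalized
  if normalized.contains "sleepy" && normalized.contains "clear-mind"
    then normalized.filter (fun e => !(e == "clear-mind")) else normalized

-- ===== PORT B =====
-- helper _relabel of Source B
def pvRelabel (s : String) : String :=
  if s == "clear mind" then "clear-mind"
  else if s == "euphoria" then "euphoric"
  else s

-- helper _normalize_one of Source B
def pvNormalizeOne (e : String) : String :=
  pvRelabel (PySem.Str.strip (PySem.Str.lower e))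

def clean_effects_alt (effects : List String) (product_type : String) : List String :=
  let normalized := effects.foldl
    (fun acc e => if !(e == "") then acc ++ [pvNormalizeOne e] else acc) []
  let pt := if !(product_type == "") then PySem.Str.lower product_type else ""
  let forbidden : PySem.Set String := PySem.Set.empty
  let forbidden := if ["indica", "indica-hybrid", "indica-dominant"].contains pt
    then PySem.Set.update forbidden pvEnergizing else forbidden
  let forbidden := if ["sativa", "sativa-hybrid", "sativa-dominant"].contains pt
    then PySem.Set.update forbidden ["sleepy", "sedated"] else forbidden
  let survivors := normalized.filter (fun e => !(List.contains forbidden e))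
  let forbidden := if survivors.any (fun e => List.contains pvSedating e)
    then PySem.Set.update forbidden
      (PySem.Set.union (PySem.Set.union pvEnergizing pvCreative) pvJoyful)
    else forbidden
  let forbidden := if survivors.contains "sleepy" && survivors.contains "clear-mind"
    then PySem.Set.add forbidden "clear-mind" else forbidden
  normalized.filter (fun e => !(List.contains forbidden e))

-- ===== PRECONDITION & SPEC =====
def Spec_clean_effects (effects : List String) (product_type : String) (out : List String) : Prop := out = clean_effects_alt effects product_type
instance (effects : List String) (product_type : String) (out : List String) : Decidable (Spec_clean_effects effects product_type out) := by unfold Spec_clean_effects; infer_instance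

-- ===== CLAIM (what is proved, stated in full; the proofs are below) =====
def Claim_equal_clean_effects : Prop := ∀ (effects : List String) (product_type : String), Dom_clean_effects effects product_type → Spec_clean_effects effects product_type (clean_effects effects product_type)

-- ===== LEMMAS AND PROOFS =====

theorem pv_filter_not_update (n : List String) (s : PySem.Set String) (t : List String) :
    n.filter (fun e => !(List.contains (PySem.Set.update s t) e)) =
    (n.filter (fun e => !(List.contains s e))).filter (fun e => !(List.contains t e)) := by
  rw [List.filter_filter]
  apply List.filter_congr; intro x _
  rw [Bool.eq_iff_iff]
  simp [PySem.Set.mem_update]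
  tauto

theorem pv_filter_not_add (n : List String) (s : PySem.Set String) (a : String) :
    n.filter (fun e => !(List.contains (PySem.Set.add s a) e)) =
    (n.filter (fun e => !(List.contains s e))).filter (fun e => !(e == a)) := by
  rw [List.filter_filter]
  apply List.filter_congr; intro x _
  rw [Bool.eq_iff_iff]
  simp [PySem.Set.mem_add]
  tauto

theorem pv_filter_not_union (n : List String) (s t : PySem.Set String) :
    n.filter (fun e => !(List.contains (PySem.Set.union s t) e)) =
    (n.filter (fun e => !(List.contains s e))).filter (fun e => !(List.contains t e)) := by
  rw [List.filter_filter]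
  apply List.filter_congr; intro x _
  rw [Bool.eq_iff_iff]
  simp [PySem.Set.mem_union]
  tauto

theorem pv_filter_not_empty (n : List String) :
    n.filter (fun e => !(List.contains (PySem.Set.empty : PySem.Set String) e)) = n := by
  simp [PySem.Set.empty]

theorem pv_contains_filter (l : List String) (p : String → Bool) (a : String) (h : p a = true) :
    (l.filter p).contains a = l.contains a := by
  rw [Bool.eq_iff_iff]
  simp [List.mem_filter, h]

theorem pv_norm_point (e : String) :
    pvNormalizeOne e = (fun x => if x == "euphoria" then "euphoric" else x)
      ((fun x => if x == "clear mind" then "clear-mind" else x)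
        ((fun x => PySem.Str.strip (PySem.Str.lower x)) e)) := by
  simp only []
  unfold pvNormalizeOne pvRelabel
  generalize PySem.Str.strip (PySem.Str.lower e) = t
  by_cases h1 : (t == "clear mind") = true
  · simp only [h1, if_true]
    simp
  · rw [Bool.not_eq_true] at h1
    simp only [h1, Bool.false_eq_true, if_false]

theorem pv_maps_eq (xs : List String) :
    xs.map pvNormalizeOne =
    (((xs.map (fun e => PySem.Str.strip (PySem.Str.lower e))).map
        (fun e => if e == "clear mind" then "clear-mind" else e)).map
        (fun e => if e == "euphoria" then "euphoric" else e)) := by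
  induction xs with
  | nil => simp only [List.map_nil]
  | cons a t ih =>
    rw [List.map_cons, List.map_cons, List.map_cons, List.map_cons, ih, pv_norm_point a]

theorem pv_norm_eq (effects : List String) :
    effects.foldl (fun acc e => if !(e == "") then acc ++ [pvNormalizeOne e] else acc) []
    =
    ((((effects.filter (fun e => !(e == ""))).map
        (fun e => PySem.Str.strip (PySem.Str.lower e))).map
        (fun e => if e == "clear mind" then "clear-mind" else e)).map
        (fun e => if e == "euphoria" then "euphoric" else e)) := by
  rw [PySem.List.foldl_append_if (p := fun e => !(e == "")) (f := pvNormalizeOne)]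
  rw [List.nil_append, pv_maps_eq]

theorem pv_core (n : List String) (F2 : PySem.Set String) :
    (if (if (n.filter (fun e => !(List.contains F2 e))).any (fun e => List.contains pvSedating e) then (((n.filter (fun e => !(List.contains F2 e))).filter (fun e => !(List.contains pvEnergizing e))).filter (fun e => !(List.contains pvCreative e))).filter (fun e => !(List.contains pvJoyful e)) else (n.filter (fun e => !(List.contains F2 e)))).contains "sleepy" && (if (n.filter (fun e => !(List.contains F2 e))).any (fun e => List.contains pvSedating e) then (((n.filter (fun e => !(List.contains F2 e))).filter (fun e => !(List.contains pvEnergizing e))).filter (fun e => !(List.contains pvCreative e))).filter (fun e => !(List.contains pvJoyful e)) else (n.filter (fun e => !(List.contains F2 e)))).contains "clear-mind" then (if (n.filter (fun e => !(List.contains F2 e))).any (fun e => List.contains pvSedating e) then (((n.filter (fun e => !(List.contains F2 e))).filter (fun e => !(List.contains pvEnergizing e))).filter (fun e => !(List.contains pvCreative e))).filter (fun e => !(List.contains pvJoyful e)) else (n.filter (fun e => !(List.contains F2 e)))).filter (fun e => !(e == "clear-mind")) else (if (n.filter (fun e => !(List.contains F2 e))).any (fun e => List.contains pvSedating e) then (((n.filter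 (fun e => !(List.contains F2 e))).filter (fun e => !(List.contains pvEnergizing e))).filter (fun e => !(List.contains pvCreative e))).filter (fun e => !(List.contains pvJoyful e)) else (n.filter (fun e => !(List.contains F2 e)))))
    =
    (n.filter (fun e => !(List.contains (if (n.filter (fun e => !(List.contains F2 e))).contains "sleepy" && (n.filter (fun e => !(List.contains F2 e))).contains "clear-mind" then PySem.Set.add (if (n.filter (fun e => !(List.contains F2 e))).any (fun e => List.contains pvSedating e) then PySem.Set.update F2 (PySem.Set.union (PySem.Set.union pvEnergizing pvCreative) pvJoyful) else F2) "clear-mind" else (if (n.filter (fun e => !(List.contains F2 e))).any (fun e => List.contains pvSedating e) then PySem.Set.update F2 (PySem.Set.union (PySem.Set.union pvEnergizing pvCreative) pvJoyful) else F2)) e))) := by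
  set m := n.filter (fun e => !(List.contains F2 e)) with hm
  have hG : m.filter (fun e => !(List.contains (PySem.Set.union (PySem.Set.union pvEnergizing pvCreative) pvJoyful) e))
      = ((m.filter (fun e => !(List.contains pvEnergizing e))).filter
           (fun e => !(List.contains pvCreative e))).filter (fun e => !(List.contains pvJoyful e)) := by
    rw [pv_filter_not_union, pv_filter_not_union]
  by_cases hsed : (m.any fun e => List.contains pvSedating e) = true
  · rw [if_pos hsed, if_pos hsed]
    have h1 : (((m.filter (fun e => !(List.contains pvEnergizing e))).filter
           (fun e => !(List.contains pvCreative e))).filter (fun e => !(List.contains pvJoyful e))).contains "sleepy" = m.contains "sleepy" := by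
      rw [pv_contains_filter _ _ _ (by decide), pv_contains_filter _ _ _ (by decide),
          pv_contains_filter _ _ _ (by decide)]
    have h2 : (((m.filter (fun e => !(List.contains pvEnergizing e))).filter
           (fun e => !(List.contains pvCreative e))).filter (fun e => !(List.contains pvJoyful e))).contains "clear-mind" = m.contains "clear-mind" := by
      rw [pv_contains_filter _ _ _ (by decide), pv_contains_filter _ _ _ (by decide),
          pv_contains_filter _ _ _ (by decide)]
    rw [h1, h2]
    by_cases hcm : (m.contains "sleepy" && m.contains "clear-mind") = true
    · rw [if_pos hcm, if_pos hcm, pv_filter_not_add, pv_filter_not_update, ← hm, hG]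
    · rw [if_neg hcm, if_neg hcm, pv_filter_not_update, ← hm, hG]
  · rw [if_neg hsed, if_neg hsed]
    by_cases hcm : (m.contains "sleepy" && m.contains "clear-mind") = true
    · rw [if_pos hcm, if_pos hcm, pv_filter_not_add, ← hm]
    · rw [if_neg hcm, if_neg hcm]

theorem pv_typefilter (n : List String) (c1 c2 : Bool) :
    (if c2 = true then (if c1 = true then n.filter (fun e => !(List.contains pvEnergizing e)) else n).filter (fun e => !((["sleepy", "sedated"] : List String).contains e)) else (if c1 = true then n.filter (fun e => !(List.contains pvEnergizing e)) else n))
    =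
    n.filter (fun e => !(List.contains (if c2 = true then PySem.Set.update (if c1 = true then PySem.Set.update PySem.Set.empty pvEnergizing else PySem.Set.empty) ["sleepy", "sedated"] else (if c1 = true then PySem.Set.update PySem.Set.empty pvEnergizing else PySem.Set.empty)) e)) := by
  cases c1 <;> cases c2 <;>
    simp only [Bool.false_eq_true, if_true, if_false] <;>
    simp only [pv_filter_not_update, pv_filter_not_empty]

theorem pv_main (effects : List String) (product_type : String) :
    clean_effects effects product_type = clean_effects_alt effects product_type := by
  unfold clean_effects clean_effects_alt
  simp only []
  by_cases h0 : effects.isEmpty = true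
  · rw [if_pos h0]
    rw [List.isEmpty_iff] at h0
    subst h0
    simp only [List.foldl_nil, List.filter_nil, List.any_nil, Bool.false_eq_true, if_false,
      List.elem_nil, Bool.and_self]
  · rw [if_neg h0]
    rw [pv_norm_eq effects]
    by_cases h1 : ((effects.filter (fun e => !(e == ""))).map
        (fun e => PySem.Str.strip (PySem.Str.lower e))).isEmpty = true
    · rw [if_pos h1]
      rw [List.isEmpty_iff] at h1
      rw [h1]
      simp only [List.map_nil, List.filter_nil, List.any_nil, Bool.false_eq_true, if_false,
        List.elem_nil, Bool.and_self]
    · rw [if_neg h1]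
      rw [pv_typefilter]
      exact pv_core _ _

-- ===== VERDICT (by name: the statement is the Claim_ definition above) =====
theorem clean_effects_spec : Claim_equal_clean_effects := by
  intro effects product_type _
  exact pv_main effects product_type
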